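-- pv_equiv track=rewrite | github.com/Archanciel/cryptopricer | helputil.py | _decodeMarkups
-- ===== SOURCE A (Python) =====
-- def _decodeMarkups(markupedStr):
--     '''
--     The input markupedStr parm contains coded markups ([cr] for setting the next words to red,
--     for example). The method replaces the markup codes with full Kivy markups.
--
--     :param markupedStr: string containing coded markups
--     :return: string containing Kivy markups
--     '''
--
--     replaceTupleList = [("[cr]", "[color=ff0000]"),
--                         ("[cg]", "[color=19ff52ff]"),
--                         ("[cy]", "[color=ffff00ff]"),
--                         ("[/cr]", "[/color]"),
--                         ("[/cg]", "[/color]"),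
--                         ("[/cy]", "[/color]"),
--                         ("[/c]", "[/color]")]
--
--     # Iterate over the strings to be replaced
--     for code, replCode in replaceTupleList:
--         # Check if string is in the main string
--         if code in markupedStr:
--             # Replace the string
--             markupedStr = markupedStr.replace(code, replCode)
--
--     return markupedStr
-- ===== SOURCE B (Python) =====
-- def _decodeMarkups(markupedStr):
--     '''
--     Single left-to-right pass: at each position try the coded markup tokens
--     against the string; on a match emit the Kivy markup from a lookup table
--     and jump past the token, otherwise copy the character.
--     '''
--     table = {"[cr]": "[color=ff0000]",
--              "[cg]": "[color=19ff52ff]",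
--              "[cy]": "[color=ffff00ff]",
--              "[/cr]": "[/color]",
--              "[/cg]": "[/color]",
--              "[/cy]": "[/color]",
--              "[/c]": "[/color]"}
--     codes = tuple(table)
--     out = []
--     i = 0
--     n = len(markupedStr)
--     while i < n:
--         for code in codes:
--             if markupedStr.startswith(code, i):
--                 out.append(table[code])
--                 i += len(code)
--                 break
--         else:
--             out.append(markupedStr[i])
--             i += 1
--     return "".join(out)
-- ===== Notes on version B (the rewrite author's own statement) =====
-- stated objective: alternative
-- what changed: Replaces A's seven sequential full-string replace passes by a single left-to-right scan that matches each coded token against the current position via a lookup table and emits its Kivy markup once.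
import Mathlib
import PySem

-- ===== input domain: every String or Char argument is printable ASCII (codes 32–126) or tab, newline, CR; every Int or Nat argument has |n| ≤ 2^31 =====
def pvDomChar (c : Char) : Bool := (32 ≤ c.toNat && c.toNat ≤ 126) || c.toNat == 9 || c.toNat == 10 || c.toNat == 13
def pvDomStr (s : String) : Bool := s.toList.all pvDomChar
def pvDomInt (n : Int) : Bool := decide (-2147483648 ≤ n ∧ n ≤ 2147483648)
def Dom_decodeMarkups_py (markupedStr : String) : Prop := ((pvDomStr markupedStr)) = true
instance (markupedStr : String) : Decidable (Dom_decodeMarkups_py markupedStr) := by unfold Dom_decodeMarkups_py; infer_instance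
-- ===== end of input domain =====

-- B replaces A's seven sequential full-string replace passes by one left-to-right
-- scan with a token lookup table; same return value on every input (alternative, not faster).


-- ===== PORT A =====
-- A's replaceTupleList, then a fold over it: 'if code in s: s = s.replace(code, replCode)'.
def pvReplaceTupleList : List (String × String) :=
  [("[cr]", "[color=ff0000]"),
   ("[cg]", "[color=19ff52ff]"),
   ("[cy]", "[color=ffff00ff]"),
   ("[/cr]", "[/color]"),
   ("[/cg]", "[/color]"),
   ("[/cy]", "[/color]"),
   ("[/c]", "[/color]")]

def decodeMarkups_py (markupedStr : String) : String :=
  pvReplaceTupleList.foldl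
    (fun acc p => if PySem.Str.isIn p.1 acc then PySem.Str.replace acc p.1 p.2 else acc)
    markupedStr

-- ===== PORT B =====
-- B's lookup table, as (coded token, Kivy markup) pairs of char lists, in B's trial order.
def pvTable : List (List Char × List Char) :=
  [(['[', 'c', 'r', ']'], ['[', 'c', 'o', 'l', 'o', 'r', '=', 'f', 'f', '0', '0', '0', '0', ']']),
   (['[', 'c', 'g', ']'], ['[', 'c', 'o', 'l', 'o', 'r', '=', '1', '9', 'f', 'f', '5', '2', 'f', 'f', ']']),
   (['[', 'c', 'y', ']'], ['[', 'c', 'o', 'l', 'o', 'r', '=', 'f', 'f', 'f', 'f', '0', '0', 'f', 'f', ']']),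
   (['[', '/', 'c', 'r', ']'], ['[', '/', 'c', 'o', 'l', 'o', 'r', ']']),
   (['[', '/', 'c', 'g', ']'], ['[', '/', 'c', 'o', 'l', 'o', 'r', ']']),
   (['[', '/', 'c', 'y', ']'], ['[', '/', 'c', 'o', 'l', 'o', 'r', ']']),
   (['[', '/', 'c', ']'], ['[', '/', 'c', 'o', 'l', 'o', 'r', ']'])]

-- first table entry whose token starts at the current position (B's inner for-loop)
def pvFirstMatch (table : List (List Char × List Char)) (l : List Char) :
    Option (List Char × List Char) :=
  match table with
  | [] => none
  | (tok, r) :: rest => if tok.isPrefixOf l then some (tok, r) else pvFirstMatch rest l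

-- B's while-loop: one pass; on a match emit the markup and jump past the token, else copy the char
def pvScan (table : List (List Char × List Char)) : List Char → List Char
  | [] => []
  | c :: t =>
    match pvFirstMatch table (c :: t) with
    | some (tok, r) => r ++ pvScan table (t.drop (tok.length - 1))
    | none => c :: pvScan table t
termination_by l => l.length
decreasing_by
  all_goals simp

def decodeMarkups_py_alt (markupedStr : String) : String :=
  String.ofList (pvScan pvTable markupedStr.toList)

-- ===== PRECONDITION & SPEC =====
def Spec_decodeMarkups_py (markupedStr : String) (out : String) : Prop := out = decodeMarkups_py_alt markupedStr
instance (markupedStr : String) (out : String) : Decidable (Spec_decodeMarkups_py markupedStr out) := by unfold Spec_decodeMarkups_py; infer_instance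

-- ===== CLAIM (what is proved, stated in full; the proofs are below) =====
def Claim_equal_decodeMarkups_py : Prop := ∀ (markupedStr : String), Dom_decodeMarkups_py markupedStr → Spec_decodeMarkups_py markupedStr (decodeMarkups_py markupedStr)

-- ===== LEMMAS AND PROOFS =====

-- pvRep is the char-level meaning of one str.replace pass (proof helper only)
def pvRep (tok repl : List Char) : List Char → List Char
  | [] => []
  | c :: t =>
    if tok.isPrefixOf (c :: t) then repl ++ pvRep tok repl (t.drop (tok.length - 1))
    else c :: pvRep tok repl t
termination_by l => l.length
decreasing_by
  all_goals simp

theorem pvGo_eq (tok repl : List Char) (htok : tok ≠ []) :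
    ∀ (fuel : Nat) (l acc : List Char), l.length ≤ fuel →
      PySem.Chars.replace.go tok repl fuel l acc = acc.reverse ++ pvRep tok repl l := by
  intro fuel
  induction fuel with
  | zero =>
    intro l acc hl
    have : l = [] := by cases l <;> simp_all
    subst this
    simp [PySem.Chars.replace.go, pvRep]
  | succ n ih =>
    intro l acc hl
    cases l with
    | nil => simp [PySem.Chars.replace.go, pvRep]
    | cons c t =>
      rw [PySem.Chars.replace.go]
      by_cases hp : tok.isPrefixOf (c :: t)
      · obtain ⟨d, tok', rfl⟩ : ∃ d tok', tok = d :: tok' := by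
          cases tok with | nil => simp at htok | cons d tok' => exact ⟨d, tok', rfl⟩
        simp only [hp, if_true]
        rw [ih _ _ (by simp at hl ⊢; omega), pvRep]
        simp [hp]
      · simp only [hp]
        rw [if_neg (by simp), ih _ _ (by simp at hl ⊢; omega), pvRep]
        rw [if_neg hp]
        simp

theorem pvReplace_eq (l tok repl : List Char) (htok : tok ≠ []) :
    PySem.Chars.replace l tok repl = pvRep tok repl l := by
  rw [PySem.Chars.replace, if_neg (by simp [htok]), pvGo_eq tok repl htok _ _ _ le_rfl]
  simp

theorem pvRep_id (tok repl : List Char) :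
    ∀ l, (∀ j, ¬ tok <+: l.drop j) → pvRep tok repl l = l := by
  intro l
  induction l with
  | nil => intro _; rw [pvRep]
  | cons c t ih =>
    intro h
    rw [pvRep, if_neg (by simpa [List.isPrefixOf_iff_prefix] using h 0)]
    exact congrArg (c :: ·) (ih fun j => by simpa using h (j + 1))

theorem pvNotPrefixAppend (tok lit x : List Char) (hlen : tok.length ≤ lit.length)
    (h : ¬ tok <+: lit) : ¬ tok <+: lit ++ x := by
  intro hx
  exact h (List.prefix_of_prefix_length_le hx (List.prefix_append lit x) hlen)

theorem pvHeadNotPrefix (tok : List Char) (c : Char) (t : List Char)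
    (h : tok.head? = some '[') (hc : c ≠ '[') : ¬ tok <+: c :: t := by
  cases tok with
  | nil => simp at h
  | cons d tt =>
    simp at h
    intro hp
    rw [List.cons_prefix_cons] at hp
    exact hc (hp.1 ▸ h ▸ rfl)

theorem pvRep_copy (tok repl : List Char) (h : tok.head? = some '[') :
    ∀ lit x, (∀ c ∈ lit, c ≠ '[') → pvRep tok repl (lit ++ x) = lit ++ pvRep tok repl x := by
  intro lit
  induction lit with
  | nil => simp
  | cons d lit' ih =>
    intro x hlit
    rw [List.cons_append, pvRep,
      if_neg (by simpa [List.isPrefixOf_iff_prefix] using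
        pvHeadNotPrefix tok d (lit' ++ x) h (hlit d (by simp)))]
    exact congrArg (d :: ·) (ih x fun c hc => hlit c (by simp [hc]))

theorem pvRep_append (tok repl lit x : List Char) (hnp : ¬ tok <+: lit ++ x)
    (h : tok.head? = some '[') (hlit : ∀ c ∈ lit.tail, c ≠ '[') :
    pvRep tok repl (lit ++ x) = lit ++ pvRep tok repl x := by
  cases lit with
  | nil => simp
  | cons l0 lrest =>
    rw [List.cons_append, pvRep, if_neg (by simpa [List.isPrefixOf_iff_prefix] using hnp)]
    exact congrArg (l0 :: ·) (pvRep_copy tok repl h lrest x (by simpa using hlit))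

theorem pvFm_append_some (T T' : List (List Char × List Char)) (l : List Char)
    (p : List Char × List Char) (h : pvFirstMatch T l = some p) :
    pvFirstMatch (T ++ T') l = some p := by
  induction T with
  | nil => simp [pvFirstMatch] at h
  | cons q rest ih =>
    obtain ⟨tok, r⟩ := q
    rw [pvFirstMatch] at h
    rw [List.cons_append, pvFirstMatch]
    split_ifs with hp
    · simpa [hp] using h
    · simp only [hp] at h
      exact ih h

theorem pvFm_append_none (T T' : List (List Char × List Char)) (l : List Char)
    (h : pvFirstMatch T l = none) : pvFirstMatch (T ++ T') l = pvFirstMatch T' l := by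
  induction T with
  | nil => simp
  | cons q rest ih =>
    obtain ⟨tok, r⟩ := q
    rw [pvFirstMatch] at h
    rw [List.cons_append, pvFirstMatch]
    split_ifs with hp
    · simp [hp] at h
    · simp only [hp] at h
      exact ih h

theorem pvFm_none_head (T : List (List Char × List Char)) (c : Char) (t : List Char)
    (hT : ∀ p ∈ T, p.1.head? = some '[') (hc : c ≠ '[') :
    pvFirstMatch T (c :: t) = none := by
  induction T with
  | nil => rfl
  | cons q rest ih =>
    obtain ⟨tok, r⟩ := q
    have htok := hT (tok, r) (by simp)
    rw [pvFirstMatch, if_neg]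
    · exact ih fun p hp => hT p (by simp [hp])
    · cases tok with
      | nil => simp at htok
      | cons d tt =>
        simp_all [List.isPrefixOf]
        exact fun h2 _ => hc h2.symm
theorem pvFm_sound (T : List (List Char × List Char)) (l : List Char) :
    ∀ tok r, pvFirstMatch T l = some (tok, r) → tok <+: l ∧ (tok, r) ∈ T := by
  induction T with
  | nil => intro tok r h; simp [pvFirstMatch] at h
  | cons q rest ih =>
    obtain ⟨tk, rr⟩ := q
    intro tok r h
    rw [pvFirstMatch] at h
    split_ifs at h with hp
    · obtain ⟨rfl, rfl⟩ : tk = tok ∧ rr = r := by simpa using h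
      exact ⟨List.isPrefixOf_iff_prefix.mp hp, by simp⟩
    · obtain ⟨h1, h2⟩ := ih tok r h
      exact ⟨h1, by simp [h2]⟩

theorem pvScan_nil (l : List Char) : pvScan [] l = l := by
  induction l with
  | nil => rw [pvScan]
  | cons c t ih => rw [pvScan]; simpa [pvFirstMatch] using ih

theorem pvScan_copy (T : List (List Char × List Char))
    (hT : ∀ p ∈ T, p.1.head? = some '[') :
    ∀ lit x, (∀ c ∈ lit, c ≠ '[') → pvScan T (lit ++ x) = lit ++ pvScan T x := by
  intro lit
  induction lit with
  | nil => simp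
  | cons d lit' ih =>
    intro x hlit
    rw [List.cons_append, pvScan, pvFm_none_head T d _ hT (hlit d (by simp))]
    exact congrArg (d :: ·) (ih x fun c hc => hlit c (by simp [hc]))

theorem pvNoLbrackPrefix (T : List (List Char × List Char))
    (hT : ∀ p ∈ T, p.2.head? = some '[') :
    ∀ (t cont : List Char), '[' ∉ cont → cont <+: pvScan T t → cont <+: t := by
  intro t
  induction t with
  | nil => intro cont _; rw [pvScan]; simp
  | cons c t' ih =>
    intro cont hc
    rw [pvScan]
    intro h
    cases cont with
    | nil => simp
    | cons d cont' =>
      rcases hm : pvFirstMatch T (c :: t') with _ | ⟨tok, r⟩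
      · rw [hm] at h
        simp only at h
        rw [List.cons_prefix_cons] at h ⊢
        exact ⟨h.1, ih cont' (by simp at hc; exact hc.2) h.2⟩
      · rw [hm] at h
        simp only at h
        have hr := hT (tok, r) (pvFm_sound T (c :: t') tok r hm).2
        cases r with
        | nil => simp at hr
        | cons r0 rt =>
          simp at hr
          rw [List.cons_append, List.cons_prefix_cons] at h
          exact absurd (h.1.trans hr) (by simp at hc; exact fun e => hc.1 e.symm)

theorem pvMaster (tokTail repl : List Char) (ht1 : tokTail ≠ []) (ht2 : '[' ∉ tokTail)
    (T : List (List Char × List Char))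
    (hT : ∀ p ∈ T, p.1.head? = some '[' ∧ '[' ∉ p.1.tail ∧ p.2.head? = some '[' ∧
      '[' ∉ p.2.tail ∧ ¬ ('[' :: tokTail) <+: p.2 ∧ ('[' :: tokTail).length ≤ p.2.length ∧
      ¬ ('[' :: tokTail) <+: p.1 ∧ ¬ p.1 <+: ('[' :: tokTail)) :
    ∀ u : List Char,
      pvRep ('[' :: tokTail) repl (pvScan T u) = pvScan (T ++ [('[' :: tokTail, repl)]) u := by
  have main : ∀ (n : Nat) (u : List Char), u.length ≤ n →
      pvRep ('[' :: tokTail) repl (pvScan T u) = pvScan (T ++ [('[' :: tokTail, repl)]) u := by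
    intro n
    induction n with
    | zero =>
      intro u hu
      have : u = [] := by cases u <;> simp_all
      subst this
      rw [pvScan, pvScan, pvRep]
    | succ n ih =>
      intro u hu
      cases u with
      | nil => rw [pvScan, pvScan, pvRep]
      | cons c t =>
        rcases hm : pvFirstMatch T (c :: t) with _ | ⟨tk, r⟩
        · -- no table match at this position
          by_cases hp : ('[' :: tokTail).isPrefixOf (c :: t)
          · -- the new token matches here
            have hpre : '[' :: tokTail <+: c :: t := List.isPrefixOf_iff_prefix.mp hp
            obtain ⟨he, htt⟩ := List.cons_prefix_cons.mp hpre
            subst he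
            obtain ⟨u'', rfl⟩ := htt
            have e1 : pvScan T ('[' :: (tokTail ++ u'')) = '[' :: (tokTail ++ pvScan T u'') := by
              rw [pvScan, hm]
              exact congrArg _ (pvScan_copy T (fun p hp => (hT p hp).1) tokTail u''
                (fun c hc e => ht2 (e ▸ hc)))
            rw [e1, pvRep, if_pos (List.isPrefixOf_iff_prefix.mpr
              (by rw [← List.cons_append]; exact List.prefix_append _ _))]
            have e2 : ((tokTail ++ pvScan T u'').drop (('[' :: tokTail).length - 1)) = pvScan T u'' := by
              simp
            rw [e2, ih u'' (by simp at hu; cases tokTail <;> simp_all; omega)]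
            rw [pvScan, pvFm_append_none _ _ _ hm, pvFirstMatch, if_pos hp]
            simp
          · -- nothing matches here: copy the char
            rw [pvScan, hm]
            have hfm' : pvFirstMatch (T ++ [('[' :: tokTail, repl)]) (c :: t) = none := by
              rw [pvFm_append_none _ _ _ hm, pvFirstMatch, if_neg hp]
              rfl
            rw [pvScan, hfm', pvRep, if_neg]
            · exact congrArg (c :: ·) (ih t (by simpa using hu))
            · intro hbad
              have hbad' := List.isPrefixOf_iff_prefix.mp hbad
              obtain ⟨he, htt⟩ := List.cons_prefix_cons.mp hbad'
              have : tokTail <+: t :=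
                pvNoLbrackPrefix T (fun p hp => (hT p hp).2.2.1) t tokTail ht2 htt
              exact hp (List.isPrefixOf_iff_prefix.mpr
                (by rw [List.cons_prefix_cons]; exact ⟨he, this⟩))
        · -- a table token matches: emit its replacement and jump
          obtain ⟨hpref, hmem⟩ := pvFm_sound T (c :: t) tk r hm
          obtain ⟨htk1, htk2, hr1, hr2, hr3, hr4, h5, h6⟩ := hT (tk, r) hmem
          rw [pvScan, hm, pvRep_append _ _ _ _ (pvNotPrefixAppend _ _ _ hr4 hr3) rfl
            (fun c hc e => hr2 (e ▸ hc))]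
          rw [ih (t.drop (tk.length - 1)) (by simp at hu ⊢; omega)]
          rw [pvScan, pvFm_append_some _ _ _ _ hm]
  exact fun u => main u.length u le_rfl

theorem pvStep_toList (s : String) (tok r : String) (htok : tok.toList ≠ []) :
    (if PySem.Str.isIn tok s then PySem.Str.replace s tok r else s).toList
      = pvRep tok.toList r.toList s.toList := by
  by_cases h : PySem.Str.isIn tok s
  · rw [if_pos h, PySem.Str.toList_replace, pvReplace_eq _ _ _ htok]
  · rw [if_neg h]
    refine (pvRep_id _ _ _ fun j hj => ?_).symm
    have hiff := PySem.Chars.exists_prefix_drop_iff_isIn tok.toList s.toList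
    rw [PySem.Str.isIn_eq] at h
    simp only [Bool.not_eq_true] at h
    exact absurd (hiff.mp ⟨j, hj⟩) (by simp [h])

theorem pvChain (u : List Char) :
    pvScan pvTable u =
      pvRep ['[', '/', 'c', ']'] ['[', '/', 'c', 'o', 'l', 'o', 'r', ']']
        (pvRep ['[', '/', 'c', 'y', ']'] ['[', '/', 'c', 'o', 'l', 'o', 'r', ']']
          (pvRep ['[', '/', 'c', 'g', ']'] ['[', '/', 'c', 'o', 'l', 'o', 'r', ']']
            (pvRep ['[', '/', 'c', 'r', ']'] ['[', '/', 'c', 'o', 'l', 'o', 'r', ']']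
              (pvRep ['[', 'c', 'y', ']'] ['[', 'c', 'o', 'l', 'o', 'r', '=', 'f', 'f', 'f', 'f', '0', '0', 'f', 'f', ']']
                (pvRep ['[', 'c', 'g', ']'] ['[', 'c', 'o', 'l', 'o', 'r', '=', '1', '9', 'f', 'f', '5', '2', 'f', 'f', ']']
                  (pvRep ['[', 'c', 'r', ']'] ['[', 'c', 'o', 'l', 'o', 'r', '=', 'f', 'f', '0', '0', '0', '0', ']']
                    u)))))) := by
  have m1 := pvMaster ['c', 'r', ']'] ['[', 'c', 'o', 'l', 'o', 'r', '=', 'f', 'f', '0', '0', '0', '0', ']'] (by decide) (by decide) [] (by simp)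
  have m2 := pvMaster ['c', 'g', ']'] ['[', 'c', 'o', 'l', 'o', 'r', '=', '1', '9', 'f', 'f', '5', '2', 'f', 'f', ']'] (by decide) (by decide) (pvTable.take 1) (by decide)
  have m3 := pvMaster ['c', 'y', ']'] ['[', 'c', 'o', 'l', 'o', 'r', '=', 'f', 'f', 'f', 'f', '0', '0', 'f', 'f', ']'] (by decide) (by decide) (pvTable.take 2) (by decide)
  have m4 := pvMaster ['/', 'c', 'r', ']'] ['[', '/', 'c', 'o', 'l', 'o', 'r', ']'] (by decide) (by decide) (pvTable.take 3) (by decide)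
  have m5 := pvMaster ['/', 'c', 'g', ']'] ['[', '/', 'c', 'o', 'l', 'o', 'r', ']'] (by decide) (by decide) (pvTable.take 4) (by decide)
  have m6 := pvMaster ['/', 'c', 'y', ']'] ['[', '/', 'c', 'o', 'l', 'o', 'r', ']'] (by decide) (by decide) (pvTable.take 5) (by decide)
  have m7 := pvMaster ['/', 'c', ']'] ['[', '/', 'c', 'o', 'l', 'o', 'r', ']'] (by decide) (by decide) (pvTable.take 6) (by decide)
  have e7 : pvTable.take 6 ++ [(['[', '/', 'c', ']'], ['[', '/', 'c', 'o', 'l', 'o', 'r', ']'])] = pvTable := by decide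
  rw [← e7, ← m7 u]
  congr 1
  have e6 : pvTable.take 5 ++ [(['[', '/', 'c', 'y', ']'], ['[', '/', 'c', 'o', 'l', 'o', 'r', ']'])] = pvTable.take 6 := by decide
  rw [← e6, ← m6 u]
  congr 1
  have e5 : pvTable.take 4 ++ [(['[', '/', 'c', 'g', ']'], ['[', '/', 'c', 'o', 'l', 'o', 'r', ']'])] = pvTable.take 5 := by decide
  rw [← e5, ← m5 u]
  congr 1
  have e4 : pvTable.take 3 ++ [(['[', '/', 'c', 'r', ']'], ['[', '/', 'c', 'o', 'l', 'o', 'r', ']'])] = pvTable.take 4 := by decide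
  rw [← e4, ← m4 u]
  congr 1
  have e3 : pvTable.take 2 ++ [(['[', 'c', 'y', ']'], ['[', 'c', 'o', 'l', 'o', 'r', '=', 'f', 'f', 'f', 'f', '0', '0', 'f', 'f', ']'])] = pvTable.take 3 := by decide
  rw [← e3, ← m3 u]
  congr 1
  have e2 : pvTable.take 1 ++ [(['[', 'c', 'g', ']'], ['[', 'c', 'o', 'l', 'o', 'r', '=', '1', '9', 'f', 'f', '5', '2', 'f', 'f', ']'])] = pvTable.take 2 := by decide
  rw [← e2, ← m2 u]
  congr 1
  have e1 : ([] : List (List Char × List Char)) ++ [(['[', 'c', 'r', ']'], ['[', 'c', 'o', 'l', 'o', 'r', '=', 'f', 'f', '0', '0', '0', '0', ']'])] = pvTable.take 1 := by decide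
  rw [← e1, ← m1 u, pvScan_nil]

-- ===== VERDICT (by name: the statement is the Claim_ definition above) =====
theorem decodeMarkups_py_spec : Claim_equal_decodeMarkups_py := by
  intro markupedStr _
  unfold Spec_decodeMarkups_py
  apply String.toList_inj.mp
  rw [decodeMarkups_py_alt, String.toList_ofList, pvChain]
  simp only [decodeMarkups_py, pvReplaceTupleList, List.foldl]
  rw [pvStep_toList _ _ _ (by decide), pvStep_toList _ _ _ (by decide),
    pvStep_toList _ _ _ (by decide), pvStep_toList _ _ _ (by decide),
    pvStep_toList _ _ _ (by decide), pvStep_toList _ _ _ (by decide),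
    pvStep_toList _ _ _ (by decide)]
  rfl
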